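-- pv_equiv track=rewrite | github.com/Dreamofheaven/algorithm | 프로그래머스/unrated/181935. 홀짝에 따라 다른 값 반환하기/홀짝에 따라 다른 값 반환하기.py | solution
-- ===== SOURCE A (Python) =====
-- def solution(n):
--     answer = 0
--     if n % 2 == 0:
--         ans1 = list(range(1, n+1))
--         for i in ans1:
--             if i % 2 == 0:
--                 answer += (i**2)
--     else:
--         ans2 = list(range(1, n+1))
--         for i in ans2:
--             if i % 2 != 0:
--                 answer += i
--
--     return answer
-- ===== SOURCE B (Python) =====
-- def solution(n):
--     if n % 2 == 0:
--         m = max(n, 0) // 2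
--         return 2 * m * (m + 1) * (2 * m + 1) // 3
--     else:
--         k = (max(n, 0) + 1) // 2
--         return k * k
-- ===== Notes on version B (the rewrite author's own statement) =====
-- stated objective: faster
-- what changed: Replaced the linear loop over the range by closed-form arithmetic: the standard sum-of-even-squares formula for even n and the square of the count of odds for odd n.
import Mathlib
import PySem

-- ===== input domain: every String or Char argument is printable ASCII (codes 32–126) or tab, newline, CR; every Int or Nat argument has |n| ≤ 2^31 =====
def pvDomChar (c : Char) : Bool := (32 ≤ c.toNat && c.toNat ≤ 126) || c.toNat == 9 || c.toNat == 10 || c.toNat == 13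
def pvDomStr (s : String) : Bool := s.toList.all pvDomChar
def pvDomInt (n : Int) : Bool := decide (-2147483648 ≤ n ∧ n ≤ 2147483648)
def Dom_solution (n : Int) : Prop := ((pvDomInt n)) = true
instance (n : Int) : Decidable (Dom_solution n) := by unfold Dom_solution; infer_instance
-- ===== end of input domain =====

-- B replaces A's O(n) loop with closed-form formulas (O(1)): 2m(m+1)(2m+1)//3 for even n, ((n+1)//2)^2 for odd n.


-- ===== PORT A =====
def solution (n : Int) : Int :=
  if PySem.Int.mod n 2 = 0 then
    (PySem.List.pyRange 1 (n + 1) 1).foldl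
      (fun answer i => if PySem.Int.mod i 2 = 0 then answer + i ^ 2 else answer) 0
  else
    (PySem.List.pyRange 1 (n + 1) 1).foldl
      (fun answer i => if PySem.Int.mod i 2 ≠ 0 then answer + i else answer) 0

-- ===== PORT B =====
def solution_alt (n : Int) : Int :=
  if PySem.Int.mod n 2 = 0 then
    let m := PySem.Int.floordiv (max n 0) 2
    PySem.Int.floordiv (2 * m * (m + 1) * (2 * m + 1)) 3
  else
    let k := PySem.Int.floordiv (max n 0 + 1) 2
    k * k

-- ===== PRECONDITION & SPEC =====
def Spec_solution (n : Int) (out : Int) : Prop := out = solution_alt n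
instance (n : Int) (out : Int) : Decidable (Spec_solution n out) := by unfold Spec_solution; infer_instance

-- ===== CLAIM (what is proved, stated in full; the proofs are below) =====
def Claim_equal_solution : Prop := ∀ (n : Int), Dom_solution n → Spec_solution n (solution n)

-- ===== LEMMAS AND PROOFS =====

-- the two loop bodies of A
def pvFe (answer i : Int) : Int := if PySem.Int.mod i 2 = 0 then answer + i ^ 2 else answer
def pvFo (answer i : Int) : Int := if PySem.Int.mod i 2 ≠ 0 then answer + i else answer

-- joint characterisation of both loops of A over 1..m
theorem pv_folds (m : Nat) :
    3 * (PySem.List.pyRange 1 ((m : Int) + 1) 1).foldl pvFe 0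
      = 2 * ((m / 2 : Nat) : Int) * (((m / 2 : Nat) : Int) + 1) * (2 * ((m / 2 : Nat) : Int) + 1)
    ∧ (PySem.List.pyRange 1 ((m : Int) + 1) 1).foldl pvFo 0 = (((m + 1) / 2 : Nat) : Int) ^ 2 := by
  induction m with
  | zero =>
      rw [show ((0 : Nat) : Int) + 1 = 1 by norm_num,
        PySem.List.pyRange_one_eq_nil (by norm_num)]
      norm_num
  | succ m ih =>
      obtain ⟨ihE, ihO⟩ := ih
      have hsplit : PySem.List.pyRange 1 ((↑(m + 1) : Int) + 1) 1
          = PySem.List.pyRange 1 ((m : Int) + 1) 1 ++ [(m : Int) + 1] := by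
        have := PySem.List.pyRange_one_succ_right (a := 1) (b := (m : Int) + 1) (by omega)
        push_cast
        push_cast at this
        exact this
      rw [hsplit, List.foldl_append, List.foldl_append]
      simp only [List.foldl_cons, List.foldl_nil]
      have hmodcast : PySem.Int.mod ((m : Int) + 1) 2 = (((m + 1) % 2 : Nat) : Int) := by
        have := PySem.Int.mod_natCast (m + 1) 2
        push_cast at this ⊢
        omega
      rcases Nat.even_or_odd (m + 1) with he | ho
      · -- m+1 even
        obtain ⟨t, ht⟩ := he
        have hmod0 : PySem.Int.mod ((m : Int) + 1) 2 = 0 := by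
          rw [hmodcast]; omega
        constructor
        · simp only [pvFe, hmod0, if_true]
          have hq : m / 2 = t - 1 := by omega
          have hq' : (m + 1) / 2 = t := by omega
          have ht1 : 1 ≤ t := by omega
          rw [hq] at ihE
          rw [hq']
          have hm : (m : Int) = 2 * (t : Int) - 1 := by
            have : m = 2 * t - 1 := by omega
            omega
          have htc : ((t - 1 : Nat) : Int) = (t : Int) - 1 := by omega
          rw [htc] at ihE
          rw [mul_add, mul_add]
          rw [ihE, hm]
          ring
        · simp only [pvFo, hmod0]
          rw [if_neg (by simp)]
          have : (m + 1 + 1) / 2 = (m + 1) / 2 := by omega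
          rw [this]; exact ihO
      · -- m+1 odd
        obtain ⟨t, ht⟩ := ho
        have hmod1 : PySem.Int.mod ((m : Int) + 1) 2 = 1 := by
          rw [hmodcast]; omega
        constructor
        · simp only [pvFe]
          rw [if_neg (by rw [hmod1]; norm_num)]
          have : (m + 1) / 2 = m / 2 := by omega
          rw [this]; exact ihE
        · simp only [pvFo]
          rw [if_pos (by rw [hmod1]; norm_num)]
          have hq : (m + 1) / 2 = t := by omega
          have hq' : (m + 1 + 1) / 2 = t + 1 := by omega
          rw [hq] at ihO
          rw [hq']
          have hm : (m : Int) = 2 * (t : Int) := by omega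
          rw [ihO, hm]
          push_cast
          ring

-- ===== VERDICT (by name: the statement is the Claim_ definition above) =====
theorem solution_spec : Claim_equal_solution := by
  intro n _
  unfold Spec_solution solution solution_alt
  by_cases hn : n ≤ 0
  · have hnil : PySem.List.pyRange 1 (n + 1) 1 = [] :=
      PySem.List.pyRange_one_eq_nil (by omega)
    have hmax : max n 0 = 0 := by omega
    rw [hnil, hmax]
    split <;> simp [PySem.Int.floordiv]
  · obtain ⟨m, rfl⟩ := Int.eq_ofNat_of_zero_le (by omega : (0 : Int) ≤ n)
    have hmax : max ((m : Int)) 0 = (m : Int) := by omega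
    obtain ⟨hE, hO⟩ := pv_folds m
    split
    · -- even branch
      rw [hmax]
      have hdiv : PySem.Int.floordiv (m : Int) 2 = ((m / 2 : Nat) : Int) :=
        PySem.Int.floordiv_natCast m 2
      rw [hdiv]
      have h3 : (0:Int) < 3 := by norm_num
      rw [PySem.Int.floordiv_eq_ediv_of_pos h3]
      have hval : 2 * ((m / 2 : Nat) : Int) * (((m / 2 : Nat) : Int) + 1) * (2 * ((m / 2 : Nat) : Int) + 1)
          = 3 * (PySem.List.pyRange 1 ((m : Int) + 1) 1).foldl pvFe 0 := hE.symm
      rw [hval, Int.mul_ediv_cancel_left _ (by norm_num)]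
      rfl
    · -- odd branch
      rw [hmax]
      have hdiv : PySem.Int.floordiv ((m : Int) + 1) 2 = (((m + 1) / 2 : Nat) : Int) := by
        have := PySem.Int.floordiv_natCast (m + 1) 2
        push_cast at this ⊢
        omega
      rw [hdiv]
      have : (PySem.List.pyRange 1 ((m : Int) + 1) 1).foldl pvFo 0
          = (((m + 1) / 2 : Nat) : Int) ^ 2 := hO
      rw [show (fun answer i => if PySem.Int.mod i 2 ≠ 0 then answer + i else answer) = pvFo from rfl,
        this]
      ring
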